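-- pv_equiv track=rewrite | github.com/sallywoolweaver/Apollo-Guidance-DSKY-Simulator | tools/check_luminary099_executive_alignment.py | find_hits
-- ===== SOURCE A (Python) =====
-- def find_hits(rows: list[dict[str, str]], sequence: list[str], mode: str) -> list[str]:
--     hits: list[str] = []
--     for i in range(len(rows) - len(sequence) + 1):
--         if mode == "exact":
--             candidate = [rows[i + j]["exact"] for j in range(len(sequence))]
--         else:
--             candidate = [rows[i + j]["opcode"] for j in range(len(sequence))]
--         if candidate == sequence:
--             hits.append(rows[i]["addr"])
--     return hits
-- ===== SOURCE B (Python) =====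
-- def find_hits(rows: list[dict[str, str]], sequence: list[str], mode: str) -> list[str]:
--     key = "exact" if mode == "exact" else "opcode"
--     m = len(sequence)
--     if m == 0 or m > len(rows):
--         return []
--     col = [row[key] for row in rows]
--     hits: list[str] = []
--     tail = col
--     for row in rows[: len(rows) - m + 1]:
--         if tail[:m] == sequence:
--             hits.append(row["addr"])
--         tail = tail[1:]
--     return hits
-- ===== Notes on version B (the rewrite author's own statement) =====
-- stated objective: alternative
-- what changed: B extracts the mode's field column in one pass and slides a length-m prefix comparison over its tails, so A's per-window inner loop of repeated dict lookups disappears; empty/oversized patterns are handled by a guard instead of an empty range.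
import Mathlib
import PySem

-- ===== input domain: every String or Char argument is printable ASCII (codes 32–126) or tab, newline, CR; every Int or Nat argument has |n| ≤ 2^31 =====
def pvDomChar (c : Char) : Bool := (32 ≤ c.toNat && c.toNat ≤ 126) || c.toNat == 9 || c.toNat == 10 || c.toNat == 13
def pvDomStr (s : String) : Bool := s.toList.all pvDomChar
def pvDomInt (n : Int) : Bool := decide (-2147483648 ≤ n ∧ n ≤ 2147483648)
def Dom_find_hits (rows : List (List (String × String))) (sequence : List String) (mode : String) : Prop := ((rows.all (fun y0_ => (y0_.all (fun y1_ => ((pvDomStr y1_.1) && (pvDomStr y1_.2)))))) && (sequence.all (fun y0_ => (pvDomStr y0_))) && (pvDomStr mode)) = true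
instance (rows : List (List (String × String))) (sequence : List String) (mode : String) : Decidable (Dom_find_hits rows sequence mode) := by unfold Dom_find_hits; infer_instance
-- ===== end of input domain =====

-- B extracts the mode's field column once and slides a prefix comparison over it, so the
-- per-window inner loop of repeated dict lookups disappears (objective: alternative).

-- ===== PORT A =====
def find_hits (rows : List (List (String × String))) (sequence : List String) (mode : String) : List String :=
  (PySem.List.pyRange 0 ((rows.length : Int) - (sequence.length : Int) + 1)).foldl
    (fun hits i =>
      let candidate :=
        if mode == "exact" then
          (PySem.List.pyRange 0 ((sequence.length : Int))).map
            (fun j => ((PySem.Dict.mk ((PySem.List.pyGet? rows (i + j)).getD [])).get? "exact").getD "")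
        else
          (PySem.List.pyRange 0 ((sequence.length : Int))).map
            (fun j => ((PySem.Dict.mk ((PySem.List.pyGet? rows (i + j)).getD [])).get? "opcode").getD "")
      if candidate = sequence then
        hits ++ [((PySem.Dict.mk ((PySem.List.pyGet? rows i).getD [])).get? "addr").getD ""]
      else hits)
    []

-- ===== PORT B =====
def pvAddr (r : List (String × String)) : String := ((PySem.Dict.mk r).get? "addr").getD ""

-- the 'for row in rows[:n-m+1]' loop of Source B: walk the truncated row list and the column tail in lockstep
def altGo (sequence : List String) (m : Nat) : List (List (String × String)) → List String → List String
  | [], _ => []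
  | r :: rs, tail =>
      let rest := altGo sequence m rs (tail.drop 1)
      if tail.take m = sequence then pvAddr r :: rest else rest

def find_hits_alt (rows : List (List (String × String))) (sequence : List String) (mode : String) : List String :=
  let key := if mode == "exact" then "exact" else "opcode"
  let m := sequence.length
  if m = 0 ∨ rows.length < m then []
  else
    let col := rows.map (fun r => ((PySem.Dict.mk r).get? key).getD "")
    -- rows[: len(rows) - m + 1] = rows.take (rows.length - m + 1): exact here since 1 ≤ m ≤ rows.length;
    -- tail[:m] is List.take m, tail[1:] is List.drop 1 (nonnegative bounds)
    altGo sequence m (rows.take (rows.length - m + 1)) col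

-- ===== PRECONDITION & SPEC =====
-- Pre_ excludes exactly the inputs where the Python A raises: an empty sequence (A then indexes
-- rows[len(rows)], IndexError), a row lacking the mode's field when every row is scanned
-- (KeyError), and a matching window whose first row lacks "addr" (KeyError).
def Pre_find_hits (rows : List (List (String × String))) (sequence : List String) (mode : String) : Prop :=
  sequence ≠ [] ∧
  (sequence.length ≤ rows.length →
    (∀ r ∈ rows, ((PySem.Dict.mk r).get? (if mode == "exact" then "exact" else "opcode")).isSome = true) ∧
    (∀ i ∈ List.range (rows.length - sequence.length + 1),
      ((rows.drop i).take sequence.length).map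
          (fun r => ((PySem.Dict.mk r).get? (if mode == "exact" then "exact" else "opcode")).getD "") = sequence →
      ((PySem.Dict.mk (rows.getD i [])).get? "addr").isSome = true))
instance (rows : List (List (String × String))) (sequence : List String) (mode : String) : Decidable (Pre_find_hits rows sequence mode) := by unfold Pre_find_hits; infer_instance

def pvWitness_find_hits : (List (List (String × String))) × List String × String :=
  ([[("opcode", "TC"), ("addr", "100")], [("opcode", "AD"), ("addr", "104")]], (["AD"], "opcode"))

def Spec_find_hits (rows : List (List (String × String))) (sequence : List String) (mode : String) (out : List String) : Prop := out = find_hits_alt rows sequence mode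
instance (rows : List (List (String × String))) (sequence : List String) (mode : String) (out : List String) : Decidable (Spec_find_hits rows sequence mode out) := by unfold Spec_find_hits; infer_instance

-- ===== CLAIM (what is proved, stated in full; the proofs are below) =====
def Claim_equal_find_hits : Prop := ∀ (rows : List (List (String × String))) (sequence : List String) (mode : String), Dom_find_hits rows sequence mode → Pre_find_hits rows sequence mode → Spec_find_hits rows sequence mode (find_hits rows sequence mode)

-- ===== LEMMAS AND PROOFS =====

-- A's candidate window at start k is the k-th length-m slice of the field column
lemma cand_eq_slice (rows : List (List (String × String))) (key : String) (k m : Nat)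
    (h : k + m ≤ rows.length) :
    (PySem.List.pyRange 0 ((m : Int))).map
        (fun j => ((PySem.Dict.mk ((PySem.List.pyGet? rows ((k : Int) + j)).getD [])).get? key).getD "")
      = ((rows.drop k).take m).map (fun r => ((PySem.Dict.mk r).get? key).getD "") := by
  rw [PySem.List.pyRange_zero_natCast, List.map_map]
  apply List.ext_getElem
  · simp; omega
  · intro j hj hj'
    have hkj : k + j < rows.length := by simp at hj; omega
    simp only [List.getElem_map, Function.comp_apply, List.getElem_range, List.getElem_take,
      List.getElem_drop]
    have : ((k : Int) + (j : Int)) = ((k + j : Nat) : Int) := by push_cast; ring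
    rw [this, PySem.List.pyGet?_natCast, List.getElem?_eq_getElem hkj]
    rfl

-- B's lockstep scan, characterised: indices s, s+1, …, s+t-1 filtered by the window test
lemma altGo_eq (seq : List String) (m : Nat) (rows : List (List (String × String)))
    (f : List (String × String) → String) (hm1 : 1 ≤ m) :
    ∀ (t s : Nat), s + t + m ≤ rows.length + 1 →
      altGo seq m ((rows.drop s).take t) (((rows.map f)).drop s)
        = (((List.range t).map (fun k => s + k)).filter
              (fun i => decide ((((rows.map f)).drop i).take m = seq))).map
            (fun i => pvAddr (rows.getD i [])) := by
  intro t
  induction t with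
  | zero => intro s _; simp [altGo]
  | succ t ih =>
    intro s hs
    have hslt : s < rows.length := by omega
    have hdrop : rows.drop s = rows[s] :: rows.drop (s + 1) := List.drop_eq_getElem_cons hslt
    rw [hdrop]
    simp only [List.take_succ_cons, altGo]
    have htail : ((rows.map f).drop s).drop 1 = (rows.map f).drop (s + 1) := by
      rw [List.drop_drop]
    have hrange : (List.range (t + 1)).map (fun k => s + k)
        = s :: (List.range t).map (fun k => (s + 1) + k) := by
      rw [List.range_succ_eq_map, List.map_cons, List.map_map]
      refine congrArg₂ List.cons (by omega) (List.map_congr_left ?_)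
      intro k _
      simp only [Function.comp_apply]
      omega
    rw [hrange, htail, ih (s + 1) (by omega)]
    have hgetD : rows[s]?.getD [] = rows[s] := by
      simp [List.getElem?_eq_getElem hslt]
    by_cases hwin : ((rows.map f).drop s).take m = seq
    · simp [hwin, hgetD]
    · simp [hwin]

-- the common core: A's loop over starts equals B's scan, for a fixed field name
lemma core_eq (rows : List (List (String × String))) (seq : List String) (key : String)
    (hm1 : 1 ≤ seq.length) (hmn : seq.length ≤ rows.length) :
    (List.range (rows.length - seq.length + 1)).foldl
      (fun hits k =>
        if ((PySem.List.pyRange 0 ((seq.length : Int))).map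
              (fun j => ((PySem.Dict.mk ((PySem.List.pyGet? rows ((k : Nat) + j)).getD [])).get? key).getD ""))
            = seq
        then hits ++ [((PySem.Dict.mk ((PySem.List.pyGet? rows ((k : Nat) : Int)).getD [])).get? "addr").getD ""]
        else hits) []
    = altGo seq seq.length (rows.take (rows.length - seq.length + 1))
        (rows.map (fun r => ((PySem.Dict.mk r).get? key).getD "")) := by
  have hB := altGo_eq seq seq.length rows (fun r => ((PySem.Dict.mk r).get? key).getD "") hm1
      (rows.length - seq.length + 1) 0 (by omega)
  simp only [List.drop_zero] at hB
  rw [hB]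
  rw [PySem.List.foldl_append_ite
      (p := fun k : Nat => ((PySem.List.pyRange 0 ((seq.length : Int))).map
              (fun j => ((PySem.Dict.mk ((PySem.List.pyGet? rows ((k : Nat) + j)).getD [])).get? key).getD "")) = seq)
      (f := fun k : Nat => ((PySem.Dict.mk ((PySem.List.pyGet? rows ((k : Nat) : Int)).getD [])).get? "addr").getD "")]
  simp only [List.nil_append]
  have hzero : (List.range (rows.length - seq.length + 1)).map (fun k => 0 + k)
      = List.range (rows.length - seq.length + 1) := by
    simp
  rw [hzero]
  have hfilter : ∀ x ∈ List.range (rows.length - seq.length + 1),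
      (decide (((PySem.List.pyRange 0 ((seq.length : Int))).map
          (fun j => ((PySem.Dict.mk ((PySem.List.pyGet? rows ((x : Nat) + j)).getD [])).get? key).getD "")) = seq))
      = (decide ((((rows.map (fun r => ((PySem.Dict.mk r).get? key).getD "")).drop x).take seq.length) = seq)) := by
    intro x hx
    have hxle : x + seq.length ≤ rows.length := by
      simp [List.mem_range] at hx; omega
    rw [cand_eq_slice rows key x seq.length hxle, List.map_take, List.map_drop]
  rw [List.filter_congr hfilter]
  apply List.map_congr_left
  intro x hx
  have hxmem : x ∈ List.range (rows.length - seq.length + 1) := (List.mem_filter.mp hx).1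
  have hxlt : x < rows.length := by
    simp [List.mem_range] at hxmem; omega
  rw [PySem.List.pyGet?_natCast, List.getElem?_eq_getElem hxlt]
  simp [pvAddr, List.getD_eq_getElem?_getD, List.getElem?_eq_getElem hxlt]

-- ===== VERDICT (by name: the statement is the Claim_ definition above) =====
theorem find_hits_spec : Claim_equal_find_hits := by
  intro rows seq mode _ hpre
  unfold Spec_find_hits
  obtain ⟨hne, -⟩ := hpre
  have hm1 : 1 ≤ seq.length := by
    cases seq with
    | nil => exact absurd rfl hne
    | cons a l => simp
  by_cases hmn : rows.length < seq.length
  · -- no window fits: both sides are []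
    simp only [find_hits, find_hits_alt]
    rw [PySem.List.pyRange_one_eq_nil (by omega : (rows.length : Int) - (seq.length : Int) + 1 ≤ 0)]
    simp [hmn]
  · have hmn : seq.length ≤ rows.length := Nat.le_of_not_lt hmn
    simp only [find_hits, find_hits_alt]
    rw [if_neg (by omega : ¬ (seq.length = 0 ∨ rows.length < seq.length))]
    have hcast : ((rows.length : Int) - (seq.length : Int) + 1)
        = (((rows.length - seq.length + 1 : Nat)) : Int) := by omega
    rw [hcast, PySem.List.pyRange_zero_natCast (rows.length - seq.length + 1), List.foldl_map]
    by_cases hmode : (mode == "exact") = true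
    · simp only [hmode, if_true]
      exact core_eq rows seq "exact" hm1 hmn
    · simp only [hmode, Bool.false_eq_true, if_false]
      exact core_eq rows seq "opcode" hm1 hmn
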